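-- pv_equiv track=rewrite | github.com/gaogelucas/SevenYanAddress | converter.py | grid_to_array_format
-- ===== SOURCE A (Python) =====
-- LAT_NUMBER = 3339600 # 如果3x3的格子
--
-- LON_NUMBER = 6679200 # 如果3x3的格子
--
-- def grid_to_array_format(lat_index, lon_index):
--     def convert_to_array(number, lat=True):
--         if number > 9999999 or number < -9999999:
--             raise ValueError("Number exceeds 7 digits")
--
--         # Check if the number has more than 7 digits and handle it
--         if number < 0:
--             # Double the number to make it positive
--             if lat:
--                 number = -number + LAT_NUMBER
--             else:
--                 number = -number + LON_NUMBER
--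
--         # Convert the number to a string
--         num_str = str(number)
--
--         # Pad the string with zeros on the left to make it 8 characters long
--         padded_num_str = num_str.zfill(8)
--
--         # Convert the padded string to a list of integers (digits)
--         num_array = [int(char) for char in padded_num_str]
--
--         return num_array
--
--     lat_array = convert_to_array(lat_index, lat=True)
--     lon_array = convert_to_array(lon_index, lat=False)
--     return (lat_array, lon_array)
-- ===== SOURCE B (Python) =====
-- LAT_NUMBER = 3339600 # 如果3x3的格子
--
-- LON_NUMBER = 6679200 # 如果3x3的格子
--
-- def grid_to_array_format(lat_index, lon_index):
--     def digits8(number, offset):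
--         if number > 9999999 or number < -9999999:
--             raise ValueError("Number exceeds 7 digits")
--         if number < 0:
--             number = -number + offset
--         out = []
--         for _ in range(8):
--             out.insert(0, number % 10)
--             number //= 10
--         return out
--     return (digits8(lat_index, LAT_NUMBER), digits8(lon_index, LON_NUMBER))
-- ===== Notes on version B (the rewrite author's own statement) =====
-- stated objective: alternative
-- what changed: B extracts the 8 digits arithmetically with a fixed 8-step divmod loop (number % 10 consed to the front, number //= 10) instead of A's str()/zfill(8)/per-char int() string pipeline; the ValueError guard and negative-offset adjustment are unchanged.
import Mathlib
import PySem

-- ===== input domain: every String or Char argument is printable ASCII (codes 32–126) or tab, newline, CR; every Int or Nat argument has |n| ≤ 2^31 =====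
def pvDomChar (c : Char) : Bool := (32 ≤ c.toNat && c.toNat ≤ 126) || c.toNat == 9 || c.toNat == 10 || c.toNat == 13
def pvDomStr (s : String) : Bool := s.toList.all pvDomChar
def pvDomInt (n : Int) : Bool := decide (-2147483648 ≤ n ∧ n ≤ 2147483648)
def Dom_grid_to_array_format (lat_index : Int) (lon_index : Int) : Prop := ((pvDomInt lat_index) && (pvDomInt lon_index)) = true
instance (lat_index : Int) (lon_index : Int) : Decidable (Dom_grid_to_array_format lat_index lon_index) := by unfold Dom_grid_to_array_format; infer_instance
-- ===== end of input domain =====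

-- B replaces A's str/zfill digit extraction by an arithmetic divmod loop peeling one digit
-- per step (objective: alternative decomposition, no string conversion); same values everywhere A returns.

-- ===== PORT A =====
-- convert_to_array: 'none' exactly where Python raises ValueError.
-- int(char) is ported as (PySem.Int.ofChars? [c]).getD 0 — exact here: every char comes from
-- str(a nonnegative int) left-padded with '0', so it is a decimal digit and Python never raises.
def pvConvertToArray (number : Int) (lat : Bool) : Option (List Int) :=
  if number > 9999999 ∨ number < -9999999 then none
  else
    let number := if number < 0 then (if lat then -number + 3339600 else -number + 6679200) else number
    let num_str := PySem.Int.toChars number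
    let padded_num_str := PySem.Chars.zfill num_str 8
    some (padded_num_str.map (fun c => (PySem.Int.ofChars? [c]).getD 0))

def grid_to_array_format (lat_index : Int) (lon_index : Int) : List Int × List Int :=
  match pvConvertToArray lat_index true, pvConvertToArray lon_index false with
  | some lat_array, some lon_array => (lat_array, lon_array)
  | _, _ => ([], [])   -- unreachable under Pre_: Python raises ValueError here

-- ===== PORT B =====
-- digits8: 'none' exactly where Python raises ValueError; the loop 'for _ in range(8):
-- out.insert(0, number % 10); number //= 10' is the foldl over pyRange 0 8 1.
def pvDigits8 (number : Int) (offset : Int) : Option (List Int) :=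
  if number > 9999999 ∨ number < -9999999 then none
  else
    let number := if number < 0 then -number + offset else number
    some (((PySem.List.pyRange 0 8 1).foldl
      (fun st _ => (PySem.Int.mod st.2 10 :: st.1, PySem.Int.floordiv st.2 10))
      (([] : List Int), number)).1)

def grid_to_array_format_alt (lat_index : Int) (lon_index : Int) : List Int × List Int :=
  ((pvDigits8 lat_index 3339600).getD [], (pvDigits8 lon_index 6679200).getD [])
  -- the .getD [] default is unreachable under Pre_: Python raises ValueError exactly where pvDigits8 is none

-- ===== PRECONDITION & SPEC =====
-- Pre_ excludes exactly the inputs where A (and B) raise ValueError ("Number exceeds 7 digits").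
def Pre_grid_to_array_format (lat_index : Int) (lon_index : Int) : Prop :=
  -9999999 ≤ lat_index ∧ lat_index ≤ 9999999 ∧ -9999999 ≤ lon_index ∧ lon_index ≤ 9999999
instance (lat_index : Int) (lon_index : Int) : Decidable (Pre_grid_to_array_format lat_index lon_index) := by
  unfold Pre_grid_to_array_format; infer_instance

def pvWitness_grid_to_array_format : Int × Int := (-1234567, 7654321)

def Spec_grid_to_array_format (lat_index : Int) (lon_index : Int) (out : List Int × List Int) : Prop := out = grid_to_array_format_alt lat_index lon_index
instance (lat_index : Int) (lon_index : Int) (out : List Int × List Int) : Decidable (Spec_grid_to_array_format lat_index lon_index out) := by unfold Spec_grid_to_array_format; infer_instance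

-- ===== CLAIM (what is proved, stated in full; the proofs are below) =====
def Claim_equal_grid_to_array_format : Prop := ∀ (lat_index : Int) (lon_index : Int), Dom_grid_to_array_format lat_index lon_index → Pre_grid_to_array_format lat_index lon_index → Spec_grid_to_array_format lat_index lon_index (grid_to_array_format lat_index lon_index)

-- ===== LEMMAS AND PROOFS =====

-- fixed-width big-endian decimal digits, the common shape of both ports' outputs
def pvPadDigits : Nat → Nat → List Nat
  | 0, _ => []
  | w+1, m => pvPadDigits w (m / 10) ++ [m % 10]

lemma pvToDigitsCore_eq (fuel : Nat) : ∀ (n : Nat) (ds : List Char), 0 < n → n < fuel →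
    Nat.toDigitsCore 10 fuel n ds = ((Nat.digits 10 n).map Nat.digitChar).reverse ++ ds := by
  induction fuel with
  | zero => intro n ds hn hlt; omega
  | succ f ih =>
    intro n ds hn hlt
    rw [Nat.toDigitsCore]
    by_cases h : n / 10 = 0
    · simp only [h]
      have hn10 : n < 10 := by omega
      rw [Nat.digits_def' (by norm_num : 1 < 10) hn, h, Nat.digits_zero]
      simp [Nat.mod_eq_of_lt hn10]
    · simp only [if_neg h]
      rw [ih (n / 10) _ (by omega) (by
        have := Nat.div_lt_self hn (by norm_num : 1 < 10); omega)]
      rw [Nat.digits_def' (by norm_num : 1 < 10) hn]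
      simp

lemma pvToDigits_eq (m : Nat) (hm : 0 < m) :
    Nat.toDigits 10 m = ((Nat.digits 10 m).map Nat.digitChar).reverse := by
  have := pvToDigitsCore_eq (m + 1) m [] hm (by omega)
  simpa [Nat.toDigits] using this

lemma pvPadDigits_eq (w : Nat) : ∀ m : Nat, m < 10 ^ w →
    pvPadDigits w m = List.replicate (w - (Nat.digits 10 m).length) 0 ++ (Nat.digits 10 m).reverse := by
  induction w with
  | zero => intro m hm; interval_cases m; simp [pvPadDigits]
  | succ w ih =>
    intro m hm
    rcases Nat.eq_zero_or_pos m with h0 | hpos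
    · subst h0
      rw [pvPadDigits, ih 0 (pow_pos (by norm_num) w)]
      simp [List.replicate_succ']
    · rw [pvPadDigits, ih (m / 10) (by
        rw [pow_succ'] at hm
        exact Nat.div_lt_of_lt_mul hm)]
      rw [Nat.digits_def' (by norm_num : 1 < 10) hpos]
      simp only [List.length_cons, List.reverse_cons, ← List.append_assoc]
      have hL : w + 1 - ((Nat.digits 10 (m / 10)).length + 1)
          = w - (Nat.digits 10 (m / 10)).length := by omega
      rw [hL]

lemma pvZfill_eq (cs : List Char) (hlen : cs.length ≤ 8)
    (hhead : ∀ c ∈ cs, ¬(c = '+' ∨ c = '-')) :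
    PySem.Chars.zfill cs 8 = List.replicate (8 - cs.length) '0' ++ cs := by
  unfold PySem.Chars.zfill
  by_cases h8 : (8 : Int) ≤ (cs.length : Int)
  · have : cs.length = 8 := by omega
    simp [this]
  · simp only [if_neg h8]
    cases cs with
    | nil => simp
    | cons c rest =>
      have hc := hhead c (List.mem_cons_self)
      simp [hc]

lemma pvOfChars_digitChar (d : Nat) (hd : d < 10) :
    (PySem.Int.ofChars? [Nat.digitChar d]).getD 0 = (d : Int) := by
  interval_cases d <;> decide

-- the heart: A's string digit extraction equals B's divmod loop on every 0 ≤ n < 10^8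
lemma pvConvert_core (n : Int) (h0 : 0 ≤ n) (h8 : n < 100000000) :
    (PySem.Chars.zfill (PySem.Int.toChars n) 8).map (fun c => (PySem.Int.ofChars? [c]).getD 0)
    = ((PySem.List.pyRange 0 8 1).foldl
        (fun st _ => (PySem.Int.mod st.2 10 :: st.1, PySem.Int.floordiv st.2 10))
        (([] : List Int), n)).1 := by
  obtain ⟨m, rfl⟩ := Int.eq_ofNat_of_zero_le h0
  have hm8 : m < 10 ^ 8 := by exact_mod_cast h8
  -- B's side: eight unfolded divmod steps = pvPadDigits 8 m, cast to Int
  have hB : ((PySem.List.pyRange 0 8 1).foldl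
        (fun st _ => (PySem.Int.mod st.2 10 :: st.1, PySem.Int.floordiv st.2 10))
        (([] : List Int), (m : Int))).1 = (pvPadDigits 8 m).map (fun d : Nat => (d : Int)) := by
    show ((([0,1,2,3,4,5,6,7] : List Int)).foldl
        (fun st _ => (PySem.Int.mod st.2 10 :: st.1, PySem.Int.floordiv st.2 10))
        (([] : List Int), (m : Int))).1 = _
    simp [List.foldl, pvPadDigits]
  rw [hB]
  -- A's side
  rcases Nat.eq_zero_or_pos m with h0m | hpos
  · subst h0m; decide
  · have htd : PySem.Int.toChars (m : Int) = Nat.toDigits 10 m := by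
      simp [PySem.Int.toChars, Int.not_lt.mpr (by positivity : (0:Int) ≤ (m:Int))]
    rw [htd, pvToDigits_eq m hpos]
    have hlt : ∀ d ∈ Nat.digits 10 m, d < 10 := fun d hd => Nat.digits_lt_base (by norm_num) hd
    have hlen : ((Nat.digits 10 m).map Nat.digitChar).reverse.length ≤ 8 := by
      simp [Nat.digits_length_le_iff (by norm_num) m |>.mpr hm8]
    rw [pvZfill_eq _ hlen (by
      intro c hc
      simp only [List.mem_reverse, List.mem_map] at hc
      obtain ⟨d, hd, rfl⟩ := hc
      have := hlt d hd
      interval_cases d <;> decide)]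
    rw [List.map_append, List.map_replicate, List.map_reverse, List.map_map]
    have hmap : (Nat.digits 10 m).map ((fun c => (PySem.Int.ofChars? [c]).getD 0) ∘ Nat.digitChar)
        = (Nat.digits 10 m).map (fun d : Nat => (d : Int)) := by
      apply List.map_congr_left
      intro d hd
      exact pvOfChars_digitChar d (hlt d hd)
    rw [hmap, pvPadDigits_eq 8 m hm8]
    simp only [List.map_append, List.map_replicate, List.map_reverse]
    have h0 : (PySem.Int.ofChars? ['0']).getD 0 = (0 : Int) := by decide
    simp [h0]

-- ===== VERDICT (by name: the statement is the Claim_ definition above) =====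
theorem grid_to_array_format_spec : Claim_equal_grid_to_array_format := by
  intro lat lon _ hpre
  obtain ⟨h1, h2, h3, h4⟩ := hpre
  have key : ∀ n C : Int, -9999999 ≤ n → n ≤ 9999999 → (0:Int) ≤ C → C ≤ 6679200 →
      (PySem.Chars.zfill (PySem.Int.toChars (if n < 0 then -n + C else n)) 8).map
          (fun c => (PySem.Int.ofChars? [c]).getD 0)
        = ((PySem.List.pyRange 0 8 1).foldl
            (fun st _ => (PySem.Int.mod st.2 10 :: st.1, PySem.Int.floordiv st.2 10))
            (([] : List Int), if n < 0 then -n + C else n)).1 := by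
    intro n C ha hb hc hd
    rcases lt_or_ge n 0 with h | h
    · simp only [if_pos h]
      exact pvConvert_core _ (by omega) (by omega)
    · simp only [if_neg (not_lt.mpr h)]
      exact pvConvert_core _ (by omega) (by omega)
  unfold Spec_grid_to_array_format grid_to_array_format grid_to_array_format_alt
    pvConvertToArray pvDigits8
  simp only [if_neg (show ¬(lat > 9999999 ∨ lat < -9999999) by omega),
             if_neg (show ¬(lon > 9999999 ∨ lon < -9999999) by omega)]
  exact Prod.ext (key lat 3339600 h1 h2 (by norm_num) (by norm_num))
    (key lon 6679200 h3 h4 (by norm_num) (by norm_num))
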